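-- pv_equiv track=rewrite | github.com/abhipad14/Data_Structures_-_Algorithms | Top Coder/LiveConcert.py | maxHappiness
-- ===== SOURCE A (Python) =====
-- def maxHappiness(h, s):
--     map = {}
--     for i in range(len(s)):
--         if map.__contains__(s[i]):
--             map[s[i]] = max(map[s[i]], h[i])
--         else:
--             map[s[i]] = h[i]
--     ans = 0
--     for value in map.values():
--         ans += value
--     return ans
-- ===== SOURCE B (Python) =====
-- def maxHappiness(h, s):
--     pairs = list(zip(s, h))
--     total = 0
--     while pairs:
--         k, v = pairs[0]
--         best = v
--         for k2, v2 in pairs[1:]: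
--             if k2 == k:
--                 best = max(best, v2)
--         total += best
--         pairs = [(k2, v2) for k2, v2 in pairs[1:] if k2 != k]
--     return total
-- ===== Notes on version B (the rewrite author's own statement) =====
-- stated objective: alternative
-- what changed: Replaces the dict of running per-key maxima with a dict-free partition loop over (string, happiness) pairs: repeatedly take the first remaining key, scan for its maximum, add it, and drop all pairs with that key.
import Mathlib
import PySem

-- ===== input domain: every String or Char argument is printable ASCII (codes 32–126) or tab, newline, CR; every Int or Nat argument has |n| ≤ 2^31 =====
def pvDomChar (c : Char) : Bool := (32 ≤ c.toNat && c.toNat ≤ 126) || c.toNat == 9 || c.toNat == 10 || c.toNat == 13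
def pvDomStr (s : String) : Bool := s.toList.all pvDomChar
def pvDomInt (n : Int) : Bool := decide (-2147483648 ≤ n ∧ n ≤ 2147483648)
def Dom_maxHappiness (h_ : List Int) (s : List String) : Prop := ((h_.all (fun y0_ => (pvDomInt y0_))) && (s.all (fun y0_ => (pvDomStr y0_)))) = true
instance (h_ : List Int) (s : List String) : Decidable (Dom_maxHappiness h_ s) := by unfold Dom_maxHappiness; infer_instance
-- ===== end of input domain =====

-- B replaces A's dict of running per-key maxima by a dict-free partition loop
-- (take the first key, scan for its maximum, drop that key's pairs): an alternative algorithm, not claimed faster.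


-- ===== PORT A =====
def maxHappiness (h_ : List Int) (s : List String) : Int :=
  ((PySem.List.pyRange 0 (s.length : Int) 1).foldl
    (fun m i =>
      if m.contains (PySem.List.pyGetD s i "") then
        m.insert (PySem.List.pyGetD s i "")
          (max (m.getD (PySem.List.pyGetD s i "") 0) (PySem.List.pyGetD h_ i 0))
      else
        m.insert (PySem.List.pyGetD s i "") (PySem.List.pyGetD h_ i 0))
    PySem.Dict.empty).values.foldl (fun ans value => ans + value) 0

-- ===== PORT B =====
def altGo : List (String × Int) → Int
  | [] => 0
  | (k, v) :: rest =>
      rest.foldl (fun b p => if p.1 == k then max b p.2 else b) v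
        + altGo (rest.filter (fun p => !(p.1 == k)))
termination_by l => l.length
decreasing_by
  simp only [List.length_unattach, List.length_cons]
  refine Nat.lt_succ_of_le (le_trans (List.length_filter_le _ _) ?_)
  simp

def maxHappiness_alt (h_ : List Int) (s : List String) : Int :=
  altGo (s.zip h_)

-- ===== PRECONDITION & SPEC =====
-- Pre_ excludes exactly the inputs with len(s) > len(h), on which A raises IndexError at h[i].
def Pre_maxHappiness (h_ : List Int) (s : List String) : Prop := s.length ≤ h_.length
instance (h_ : List Int) (s : List String) : Decidable (Pre_maxHappiness h_ s) := by unfold Pre_maxHappiness; infer_instance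
def pvWitness_maxHappiness : List Int × List String := ([3, 5, 4], ["a", "b", "a"])

def Spec_maxHappiness (h_ : List Int) (s : List String) (out : Int) : Prop := out = maxHappiness_alt h_ s
instance (h_ : List Int) (s : List String) (out : Int) : Decidable (Spec_maxHappiness h_ s out) := by unfold Spec_maxHappiness; infer_instance

-- ===== CLAIM (what is proved, stated in full; the proofs are below) =====
def Claim_equal_maxHappiness : Prop := ∀ (h_ : List Int) (s : List String), Dom_maxHappiness h_ s → Pre_maxHappiness h_ s → Spec_maxHappiness h_ s (maxHappiness h_ s)

-- ===== LEMMAS AND PROOFS =====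

/-- The body of A's dict-building loop, on a (string, happiness) pair. -/
def pvStep (m : PySem.Dict String Int) (p : String × Int) : PySem.Dict String Int :=
  m.insert p.1 (if m.contains p.1 then max (m.getD p.1 0) p.2 else p.2)

def pvDict (P : List (String × Int)) : PySem.Dict String Int :=
  P.foldl pvStep PySem.Dict.empty

/-- Max happiness among the pairs of `P` whose key is `k` (0 if there are none). -/
def pvVal (P : List (String × Int)) (k : String) : Int :=
  match P.filter (fun p => p.1 == k) with
  | [] => 0
  | q :: qs => qs.foldl (fun b p => max b p.2) q.2

lemma pvStep_eq (m : PySem.Dict String Int) (p : String × Int) :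
    (if m.contains p.1 then m.insert p.1 (max (m.getD p.1 0) p.2) else m.insert p.1 p.2) = pvStep m p := by
  unfold pvStep
  by_cases h : m.contains p.1 <;> simp [h]

lemma range_zip (s : List String) (h : List Int) :
    ∀ (d : PySem.Dict String Int), s.length ≤ h.length →
      (List.range s.length).foldl
        (fun m k =>
          if m.contains (s.getD k "") = true then
            m.insert (s.getD k "") (max (m.getD (s.getD k "") 0) (h.getD k 0))
          else m.insert (s.getD k "") (h.getD k 0)) d
        = (s.zip h).foldl
          (fun m p =>
            if m.contains p.1 = true then m.insert p.1 (max (m.getD p.1 0) p.2)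
            else m.insert p.1 p.2) d := by
  induction s generalizing h with
  | nil => simp
  | cons a s' ih =>
      intro d hle
      cases h with
      | nil => simp at hle
      | cons b h' =>
          simp only [List.length_cons]
          rw [List.range_succ_eq_map]
          simp only [List.foldl_cons, List.foldl_map, List.getD_cons_zero, List.getD_cons_succ,
            List.zip_cons_cons]
          exact ih h' _ (by simpa using hle)

lemma A_eq_dict (h_ : List Int) (s : List String) (hle : s.length ≤ h_.length) :
    maxHappiness h_ s = (pvDict (s.zip h_)).values.foldl (fun ans value => ans + value) 0 := by
  unfold maxHappiness pvDict
  rw [PySem.List.pyRange_zero_nat, List.foldl_map]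
  simp only [PySem.List.pyGetD_natCast]
  rw [range_zip s h_ _ hle]
  have hf : (fun (m : PySem.Dict String Int) (p : String × Int) =>
      if m.contains p.1 = true then m.insert p.1 (max (m.getD p.1 0) p.2) else m.insert p.1 p.2)
      = pvStep := funext fun m => funext fun p => pvStep_eq m p
  rw [hf]

lemma keys_pvDict (P : List (String × Int)) :
    (pvDict P).keys = PySem.Set.ofList (P.map (fun p => p.1)) := by
  unfold pvDict pvStep
  rw [PySem.Dict.keys_foldl_insert_key P (fun p => p.1)
    (fun d p => if d.contains p.1 then max (d.getD p.1 0) p.2 else p.2) PySem.Dict.empty]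
  simp [PySem.Set.update_nil_left]

lemma nodup_keys_pvDict (P : List (String × Int)) : (pvDict P).keys.Nodup := by
  unfold pvDict pvStep
  exact PySem.Dict.nodup_keys_foldl_insert_key P (fun p => p.1) _ _ (by simp)

lemma contains_pvDict (P : List (String × Int)) (k : String) :
    (pvDict P).contains k = true ↔ ∃ p ∈ P, p.1 = k := by
  rw [PySem.Dict.contains_iff_mem_keys, keys_pvDict, PySem.Set.mem_ofList]
  simp [eq_comm]

lemma getD_pvDict (P : List (String × Int)) (k : String) :
    (pvDict P).getD k 0 = pvVal P k := by
  induction P using List.reverseRecOn with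
  | nil => simp [pvDict, pvVal]
  | append_singleton P p ih =>
      have hd : pvDict (P ++ [p]) = pvStep (pvDict P) p := by
        unfold pvDict; rw [List.foldl_append, List.foldl_cons, List.foldl_nil]
      rw [hd]
      unfold pvStep
      rw [PySem.Dict.getD_insert]
      unfold pvVal
      rw [List.filter_append]
      by_cases hk : p.1 = k
      · subst hk
        simp only [List.filter_cons, beq_self_eq_true, ite_true, List.filter_nil]
        rcases hF : P.filter (fun q => q.1 == p.1) with _ | ⟨q, qs⟩
        · have hc : (pvDict P).contains p.1 = false := by
            rw [← Bool.not_eq_true, contains_pvDict]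
            rintro ⟨r, hr, hr1⟩
            have hrf : r ∈ P.filter (fun q => q.1 == p.1) := by
              rw [List.mem_filter]; exact ⟨hr, by simp [hr1]⟩
            rw [hF] at hrf; simp at hrf
          rw [hF]
          simp [hc]
        · have hc : (pvDict P).contains p.1 = true := by
            rw [contains_pvDict]
            have hq : q ∈ P.filter (fun q => q.1 == p.1) := by rw [hF]; simp
            rw [List.mem_filter] at hq
            exact ⟨q, hq.1, by simpa using hq.2⟩
          rw [hc, if_pos rfl, ih]
          unfold pvVal
          rw [hF]
          simp [List.foldl_append]
      · have hb : (p.1 == k) = false := by simp [hk]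
        rw [if_neg (fun h => hk h.symm), ih]
        unfold pvVal
        simp [hb]

lemma sum_perm_keys (l1 l2 : List String) (f : String → Int)
    (h1 : l1.Nodup) (h2 : l2.Nodup) (h : ∀ x, x ∈ l1 ↔ x ∈ l2) :
    (l1.map f).sum = (l2.map f).sum := by
  have hp : l1.Perm l2 := (List.perm_ext_iff_of_nodup h1 h2).2 h
  exact (hp.map f).sum_eq

lemma A_sum (h_ : List Int) (s : List String) (hle : s.length ≤ h_.length) :
    maxHappiness h_ s
      = ((PySem.Set.ofList ((s.zip h_).map (fun p => p.1))).map (fun k => pvVal (s.zip h_) k)).sum := by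
  rw [A_eq_dict _ _ hle, PySem.List.foldl_add _ (fun x => x) 0,
    PySem.Dict.values_eq_map_keys _ (nodup_keys_pvDict _) 0, keys_pvDict]
  simp [getD_pvDict, Function.comp_def]

lemma filter_ne_filter_eq (rest : List (String × Int)) (k k' : String) (hne : k' ≠ k) :
    (rest.filter (fun p => !(p.1 == k))).filter (fun p => p.1 == k')
      = rest.filter (fun p => p.1 == k') := by
  have hne' : ¬ k = k' := fun h => hne h.symm
  induction rest with
  | nil => rfl
  | cons p rest ih =>
      by_cases h1 : p.1 = k'
      · simp [h1, hne, ih]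
      · by_cases h2 : p.1 = k <;> simp [h1, h2, ih, hne']

lemma map_fst_filter (rest : List (String × Int)) (k : String) :
    (rest.filter (fun p => !(p.1 == k))).map (fun p => p.1)
      = (rest.map (fun p => p.1)).filter (fun x => !(x == k)) := by
  induction rest with
  | nil => rfl
  | cons p rest ih => by_cases h : p.1 = k <;> simp [h, ih]

lemma B_sum : ∀ (n : Nat) (P : List (String × Int)), P.length ≤ n →
    altGo P = ((PySem.Set.ofList (P.map (fun p => p.1))).map (fun k => pvVal P k)).sum := by
  intro n
  induction n with
  | zero =>
      intro P hP
      cases P with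
      | nil => simp [altGo, pvVal]
      | cons p rest => simp at hP
  | succ n ih =>
      intro P hP
      match P with
      | [] => simp [altGo, pvVal]
      | (k, v) :: rest =>
          simp only [altGo]
          have hbest : rest.foldl (fun b p => if p.1 == k then max b p.2 else b) v
              = pvVal ((k, v) :: rest) k := by
            unfold pvVal
            simp only [List.filter_cons, beq_self_eq_true, ite_true]
            rw [PySem.List.foldl_if_eq_foldl_filter (fun p => p.1 == k) (fun b p => max b p.2) rest v]
          have hmemrest' : ∀ x, x ∈ (rest.filter (fun p => !(p.1 == k))).map (fun p => p.1)
              ↔ x ∈ rest.map (fun p => p.1) ∧ x ≠ k := by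
            intro x
            rw [map_fst_filter, List.mem_filter]
            simp
          have hknotin : k ∉ PySem.Set.ofList ((rest.filter (fun p => !(p.1 == k))).map (fun p => p.1)) := by
            rw [PySem.Set.mem_ofList, hmemrest']
            rintro ⟨-, h⟩; exact h rfl
          have hperm : ((PySem.Set.ofList (((k, v) :: rest).map (fun p => p.1))).map
                (fun k' => pvVal ((k, v) :: rest) k')).sum
              = ((k :: PySem.Set.ofList ((rest.filter (fun p => !(p.1 == k))).map (fun p => p.1))).map
                (fun k' => pvVal ((k, v) :: rest) k')).sum := by
            apply sum_perm_keys
            · exact PySem.Set.nodup_ofList _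
            · exact List.Nodup.cons hknotin (PySem.Set.nodup_ofList _)
            · intro x
              rw [PySem.Set.mem_ofList, List.map_cons, List.mem_cons, List.mem_cons,
                PySem.Set.mem_ofList, hmemrest']
              by_cases hx : x = k
              · simp [hx]
              · simp [hx]
          have hcongr : ∀ k' ∈ PySem.Set.ofList ((rest.filter (fun p => !(p.1 == k))).map (fun p => p.1)),
              pvVal ((k, v) :: rest) k' = pvVal (rest.filter (fun p => !(p.1 == k))) k' := by
            intro k' hk'
            rw [PySem.Set.mem_ofList, hmemrest'] at hk'
            have hne : (k == k') = false := by
              simp only [beq_eq_false_iff_ne, ne_eq]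
              exact fun h => hk'.2 h.symm
            unfold pvVal
            rw [List.filter_cons]
            simp only [hne, Bool.false_eq_true, ite_false]
            rw [filter_ne_filter_eq rest k k' hk'.2]
          have hlen : (rest.filter (fun p => !(p.1 == k))).length ≤ n :=
            le_trans (List.length_filter_le _ _) (Nat.le_of_succ_le_succ hP)
          rw [hperm, List.map_cons, List.sum_cons, ← hbest,
            List.map_congr_left hcongr, ← ih _ hlen]

-- ===== VERDICT =====
theorem maxHappiness_spec : Claim_equal_maxHappiness := by
  intro h_ s _ hpre
  unfold Spec_maxHappiness maxHappiness_alt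
  rw [A_sum h_ s hpre, B_sum (s.zip h_).length (s.zip h_) le_rfl]
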